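-- pv_equiv track=rewrite | github.com/fubarfu/SCYTcheck | src/services/review_service.py | _derive_group_decision
-- ===== SOURCE A (Python) =====
-- def _derive_group_decision(statuses: list[str]) -> str:
--     normalized = [str(status).strip().lower() for status in statuses if str(status).strip()]
--     if not normalized:
--         return "unreviewed"
--     if all(status in {"rejected"} for status in normalized):
--         return "rejected"
--     # A group is confirmed if all candidates have been explicitly reviewed
--     # (confirmed/edited or rejected) and at least one is confirmed/edited.
--     # This is the normal state after a user selects a name from a group:
--     # the chosen spelling is "confirmed" and alternates are "rejected".
--     reviewed_statuses = {"confirmed", "edited", "rejected"}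
--     if all(status in reviewed_statuses for status in normalized):
--         if any(status in {"confirmed", "edited"} for status in normalized):
--             return "confirmed"
--     return "unreviewed"
-- ===== SOURCE B (Python) =====
-- def _derive_group_decision(statuses: list[str]) -> str:
--     any_status = False
--     all_rejected = True
--     all_reviewed = True
--     any_confirmed = False
--     for status in statuses:
--         t = str(status).strip()
--         if not t:
--             continue
--         s = t.lower()
--         any_status = True
--         all_rejected = all_rejected and s == "rejected"
--         all_reviewed = all_reviewed and s in ("confirmed", "edited", "rejected")
--         any_confirmed = any_confirmed or s in ("confirmed", "edited")
--     if not any_status: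
--         return "unreviewed"
--     if all_rejected:
--         return "rejected"
--     if all_reviewed and any_confirmed:
--         return "confirmed"
--     return "unreviewed"
-- ===== Notes on version B (the rewrite author's own statement) =====
-- stated objective: alternative
-- what changed: Replaces the built normalized list and three separate all/any scans with a single fold over the input accumulating four booleans (non-empty, all-rejected, all-reviewed, any-confirmed), deciding the verdict from those flags.
import Mathlib
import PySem

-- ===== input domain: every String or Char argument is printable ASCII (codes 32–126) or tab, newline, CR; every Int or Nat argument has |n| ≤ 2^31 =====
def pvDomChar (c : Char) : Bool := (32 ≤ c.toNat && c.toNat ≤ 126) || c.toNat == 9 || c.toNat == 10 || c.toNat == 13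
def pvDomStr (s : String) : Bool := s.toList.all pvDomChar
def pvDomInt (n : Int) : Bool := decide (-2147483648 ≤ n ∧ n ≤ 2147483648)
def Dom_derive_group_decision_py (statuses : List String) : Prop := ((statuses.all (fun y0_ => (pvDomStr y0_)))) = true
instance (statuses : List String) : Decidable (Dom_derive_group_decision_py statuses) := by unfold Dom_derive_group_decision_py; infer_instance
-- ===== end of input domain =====

-- B replaces the normalized list and three all/any scans by one fold accumulating four booleans (alternative decomposition, same cost).

-- ===== PORT A =====
-- A's list comprehension: filter on the stripped string being non-empty, map strip-then-lower.
def pvNorm (statuses : List String) : List String :=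
  (statuses.filter (fun st => PySem.Str.strip st != "")).map
    (fun st => PySem.Str.lower (PySem.Str.strip st))

def derive_group_decision_py (statuses : List String) : String :=
  let normalized := pvNorm statuses
  if normalized = [] then "unreviewed"
  else if normalized.all (fun s => s == "rejected") then "rejected"
  else if normalized.all (fun s => s == "confirmed" || s == "edited" || s == "rejected") then
    if normalized.any (fun s => s == "confirmed" || s == "edited") then "confirmed"
    else "unreviewed"
  else "unreviewed"

-- ===== PORT B =====
def pvStepB (st : Bool × Bool × Bool × Bool) (status : String) : Bool × Bool × Bool × Bool :=
  let t := PySem.Str.strip status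
  if t = "" then st
  else
    let s := PySem.Str.lower t
    (true,
     st.2.1 && (s == "rejected"),
     st.2.2.1 && (s == "confirmed" || s == "edited" || s == "rejected"),
     st.2.2.2 || (s == "confirmed" || s == "edited"))

def derive_group_decision_py_alt (statuses : List String) : String :=
  let r := statuses.foldl pvStepB (false, true, true, false)
  if !r.1 then "unreviewed"
  else if r.2.1 then "rejected"
  else if r.2.2.1 && r.2.2.2 then "confirmed"
  else "unreviewed"

-- ===== PRECONDITION & SPEC =====
def Spec_derive_group_decision_py (statuses : List String) (out : String) : Prop := out = derive_group_decision_py_alt statuses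
instance (statuses : List String) (out : String) : Decidable (Spec_derive_group_decision_py statuses out) := by unfold Spec_derive_group_decision_py; infer_instance

-- ===== CLAIM (what is proved, stated in full; the proofs are below) =====
def Claim_equal_derive_group_decision_py : Prop := ∀ (statuses : List String), Dom_derive_group_decision_py statuses → Spec_derive_group_decision_py statuses (derive_group_decision_py statuses)

-- ===== LEMMAS AND PROOFS =====

lemma pvFold_char (xs : List String) : ∀ (a r v c : Bool),
    xs.foldl pvStepB (a, r, v, c) =
      (a || !(pvNorm xs).isEmpty,
       r && (pvNorm xs).all (fun s => s == "rejected"),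
       v && (pvNorm xs).all (fun s => s == "confirmed" || s == "edited" || s == "rejected"),
       c || (pvNorm xs).any (fun s => s == "confirmed" || s == "edited")) := by
  induction xs with
  | nil => intro a r v c; simp [pvNorm]
  | cons x xs ih =>
    intro a r v c
    by_cases h : PySem.Str.strip x = ""
    · simp [List.foldl, pvStepB, h, pvNorm]
      have := ih a r v c
      simpa [pvNorm] using this
    · simp only [List.foldl, pvStepB, h]
      rw [ih]
      have hb : (PySem.Str.strip x != "") = true := by simp [h]
      have hn : pvNorm (x :: xs) = PySem.Str.lower (PySem.Str.strip x) :: pvNorm xs := by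
        simp only [pvNorm, List.filter_cons, hb, if_true, List.map_cons]
      simp only [hn, List.isEmpty_cons, List.all_cons, List.any_cons, Bool.not_false,
        Bool.or_true, Bool.true_or, Bool.and_assoc, Bool.or_assoc, if_false]

-- ===== VERDICT (by name: the statement is the Claim_ definition above) =====
theorem derive_group_decision_py_spec : Claim_equal_derive_group_decision_py := by
  intro statuses _
  unfold Spec_derive_group_decision_py derive_group_decision_py derive_group_decision_py_alt
  rw [pvFold_char]
  simp only [Bool.false_or, Bool.true_and]
  by_cases hempty : pvNorm statuses = []
  · simp [hempty]
  · have h1 : (pvNorm statuses).isEmpty = false := by simp [hempty]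
    cases hr : (pvNorm statuses).all (fun s => s == "rejected") <;>
      cases hv : (pvNorm statuses).all
        (fun s => s == "confirmed" || s == "edited" || s == "rejected") <;>
      cases hc : (pvNorm statuses).any (fun s => s == "confirmed" || s == "edited") <;>
      simp [hempty, h1, hr, hv, hc]
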